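-- pv_equiv track=rewrite | github.com/ChanghyunRyu/Python-CodingTest-note | implementation/law_of_inheritance/law_of_inheritance.py | solution
-- ===== SOURCE A (Python) =====
-- def solution(queries):
--     answer = []
--     law = {'RR': ['RR', 'RR', 'RR', 'RR'],
--            'Rr': ['RR', 'Rr', 'Rr', 'rr'],
--            'rr': ['rr', 'rr', 'rr', 'rr']}
--     for g, n in queries:
--         answer.append(return_characteristics(g, n, law))
--     return answer
--
-- def return_characteristics(generation, number, law):
--     if generation == 1:
--         return 'Rr'
--     number, remain = divmod(number-1, 4)
--     parent = return_characteristics(generation-1, number+1, law)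
--     return law[parent][remain]
-- ===== SOURCE B (Python) =====
-- def solution(queries):
--     law = {'RR': ['RR', 'RR', 'RR', 'RR'],
--            'Rr': ['RR', 'Rr', 'Rr', 'rr'],
--            'rr': ['rr', 'rr', 'rr', 'rr']}
--     return [genotype(g, n, law) for g, n in queries]
--
--
-- def genotype(generation, number, law):
--     # collect the child-slot remainders from the query position down to the root
--     digits = []
--     num = number
--     for _ in range(generation - 1):
--         num, r = divmod(num - 1, 4)
--         digits.append(r)
--         num += 1
--     # the root is always 'Rr'; apply the inheritance law from the root downward
--     result = 'Rr'
--     for r in reversed(digits):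
--         result = law[result][r]
--     return result
-- ===== Notes on version B (the rewrite author's own statement) =====
-- stated objective: faster
-- what changed: Replaces the recursive helper with an iterative two-phase one: a loop collects the divmod remainders up-front, then a second loop folds the law table over them in reverse (root downward); the same work without Python function-call/recursion overhead per generation.
import Mathlib
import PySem

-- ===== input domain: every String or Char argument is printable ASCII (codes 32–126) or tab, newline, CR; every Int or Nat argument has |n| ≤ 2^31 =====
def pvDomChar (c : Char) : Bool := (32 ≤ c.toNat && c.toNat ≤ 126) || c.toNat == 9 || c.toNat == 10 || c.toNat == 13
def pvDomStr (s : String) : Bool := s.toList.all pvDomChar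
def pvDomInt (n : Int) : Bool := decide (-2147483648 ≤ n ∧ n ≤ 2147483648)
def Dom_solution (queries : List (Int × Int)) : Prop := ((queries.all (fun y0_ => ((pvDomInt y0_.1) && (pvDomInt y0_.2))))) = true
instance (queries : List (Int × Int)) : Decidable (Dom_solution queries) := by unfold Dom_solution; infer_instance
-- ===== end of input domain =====

-- B replaces A's recursive helper by an iterative one (collect the divmod remainders,
-- then fold the law table over them in reverse); same cost, different decomposition.

-- ===== PORT A =====
-- the 'law' dict (identical literal in A and B; insertion order as in the source)
def lawTable : PySem.Dict String (List String) :=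
  PySem.Dict.ofList [("RR", ["RR", "RR", "RR", "RR"]),
                     ("Rr", ["RR", "Rr", "Rr", "rr"]),
                     ("rr", ["rr", "rr", "rr", "rr"])]

-- return_characteristics(generation, number, law): the recursion is on the Int 'generation',
-- which Pre_ keeps ≥ 1, so we recurse on generation.toNat (exact there; the 0 case is unreachable
-- under Pre_). law[parent][remain] never raises (parent is always a key, remain = (number-1) % 4 ∈ [0,4)),
-- so the total getD forms are exact.
def returnCharacteristics (generation : Nat) (number : Int) : String :=
  match generation with
  | 0 => "Rr"          -- unreachable under Pre_ (Python would recurse forever)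
  | 1 => "Rr"          -- 'if generation == 1: return Rr'
  | k + 2 =>
    let number' := PySem.Int.floordiv (number - 1) 4
    let remain := PySem.Int.mod (number - 1) 4
    let parent := returnCharacteristics (k + 1) (number' + 1)
    PySem.List.pyGetD (PySem.Dict.getD lawTable parent []) remain ""

-- solution: 'answer = []; for g, n in queries: answer.append(...)'
def solution (queries : List (Int × Int)) : List String :=
  queries.foldl (fun answer gn => answer ++ [returnCharacteristics gn.1.toNat gn.2]) []

-- ===== PORT B =====  (B's Python builds the identical 'law' dict; ported as the shared constant lawTable)
-- phase 1 of genotype: 'for _ in range(generation-1): num, r = divmod(num-1, 4); digits.append(r); num += 1'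
-- divmod(num-1, 4) has the constant nonzero divisor 4, so it never raises and is exactly
-- (floordiv, mod) — ported as that pair.
def collectDigits (steps : Nat) (num : Int) : List Int :=
  match steps with
  | 0 => []
  | k + 1 =>
    let q := PySem.Int.floordiv (num - 1) 4
    let r := PySem.Int.mod (num - 1) 4
    r :: collectDigits k (q + 1)

-- phase 2: 'result = Rr; for r in reversed(digits): result = law[result][r]'
def applyLaw (result : String) (r : Int) : String :=
  PySem.List.pyGetD (PySem.Dict.getD lawTable result []) r ""

def genotype (generation : Int) (number : Int) : String :=
  let digits := collectDigits (generation - 1).toNat number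
  digits.reverse.foldl applyLaw "Rr"

-- '[genotype(g, n, law) for g, n in queries]'
def solution_alt (queries : List (Int × Int)) : List String :=
  queries.map (fun gn => genotype gn.1 gn.2)

-- ===== PRECONDITION & SPEC =====
-- Python A's helper recurses on generation with no base case below 1, so for any query with
-- generation ≤ 0 it recurses forever (RecursionError): those inputs are excluded. (For very
-- large generations CPython also hits its recursion limit — an environment limit, not a
-- property of the algorithm, so it is not modelled here.)
def Pre_solution (queries : List (Int × Int)) : Prop :=
  (queries.all (fun gn => decide (1 ≤ gn.1))) = true
instance (queries : List (Int × Int)) : Decidable (Pre_solution queries) := by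
  unfold Pre_solution; infer_instance

def pvWitness_solution : (List (Int × Int)) := [(1, 1), (2, 3), (3, 8), (2, -1), (5, 123)]

def Spec_solution (queries : List (Int × Int)) (out : List String) : Prop := out = solution_alt queries
instance (queries : List (Int × Int)) (out : List String) : Decidable (Spec_solution queries out) := by unfold Spec_solution; infer_instance

-- ===== CLAIM (what is proved, stated in full; the proofs are below) =====
def Claim_equal_solution : Prop := ∀ (queries : List (Int × Int)), Dom_solution queries → Pre_solution queries → Spec_solution queries (solution queries)

-- ===== LEMMAS AND PROOFS =====

-- folding the law over the collected remainders (deepest first) is A's recursion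
lemma foldl_collect (k : Nat) (n : Int) :
    (collectDigits k n).reverse.foldl applyLaw "Rr" = returnCharacteristics (k + 1) n := by
  induction k generalizing n with
  | zero => simp [collectDigits, returnCharacteristics]
  | succ k ih =>
    simp only [collectDigits, returnCharacteristics,
      List.reverse_cons, List.foldl_append, List.foldl_cons, List.foldl_nil, ih]
    simp [applyLaw]

-- per-query agreement under 1 ≤ g
lemma genotype_eq (g n : Int) (hg : 1 ≤ g) :
    returnCharacteristics g.toNat n = genotype g n := by
  unfold genotype
  have h : g.toNat = (g - 1).toNat + 1 := by omega
  rw [foldl_collect, h]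

-- ===== VERDICT (by name: the statement is the Claim_ definition above) =====
theorem solution_spec : Claim_equal_solution := by
  intro queries _ hpre
  unfold Spec_solution solution solution_alt
  rw [PySem.List.foldl_append_singleton_eq_map]
  apply List.map_congr_left
  intro gn hmem
  exact genotype_eq gn.1 gn.2 (of_decide_eq_true (List.all_eq_true.mp hpre gn hmem))
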